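-- pv_equiv track=rewrite | github.com/artemmikhalitsin/mtg_isograms | isogram_count/isograms_list.py | is_isogram
-- ===== SOURCE A (Python) =====
-- def is_isogram(card):
--     if len(card) < 1:
--         return True
--     i = 0
--     while i < len(card)-1:
--         curr = card[i]
--         next = card[i+1]
--         if curr == next:
--             return False
--         i = i+1
--     return True
-- ===== SOURCE B (Python) =====
-- from itertools import groupby
--
-- def is_isogram(card):
--     return all(sum(1 for _ in g) == 1 for _, g in groupby(card))
-- ===== Notes on version B (the rewrite author's own statement) =====
-- stated objective: idiomatic
-- what changed: Replaces the index-based while loop comparing adjacent characters with itertools.groupby: the string is partitioned into maximal runs of equal consecutive characters and the result is True iff every run has length 1.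
import Mathlib
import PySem

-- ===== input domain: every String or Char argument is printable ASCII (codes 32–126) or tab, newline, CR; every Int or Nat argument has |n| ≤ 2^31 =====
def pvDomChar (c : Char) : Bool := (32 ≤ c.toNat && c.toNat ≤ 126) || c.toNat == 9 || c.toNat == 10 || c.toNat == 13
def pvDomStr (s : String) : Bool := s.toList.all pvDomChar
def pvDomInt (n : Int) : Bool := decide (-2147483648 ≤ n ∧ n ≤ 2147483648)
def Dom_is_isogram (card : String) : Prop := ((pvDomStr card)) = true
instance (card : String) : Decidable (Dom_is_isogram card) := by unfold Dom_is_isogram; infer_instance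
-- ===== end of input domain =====

-- B replaces the index-based adjacent-comparison while loop with a run-partition
-- (itertools.groupby): True iff every maximal run of equal consecutive characters has length 1.

-- ===== PORT A =====
-- the while loop: i runs while i < len-1, comparing card[i] with card[i+1];
-- both indices are provably in range there, so total getElem is exact Python indexing here
def isogramLoopA (s : List Char) (i : Nat) : Bool :=
  if h : i < s.length - 1 then
    let curr := s[i]'(by omega)
    let next := s[i+1]'(by omega)
    if curr == next then false
    else isogramLoopA s (i+1)
  else true
termination_by s.length - 1 - i

def is_isogram (card : String) : Bool :=
  if PySem.Str.len card < 1 then true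
  else isogramLoopA card.toList 0

-- ===== PORT B =====
-- itertools.groupby(card): maximal runs of equal consecutive characters
def isogramRuns : List Char → List (List Char)
  | [] => []
  | a :: t =>
    match isogramRuns t with
    | (b :: g) :: gs => if a == b then (a :: b :: g) :: gs else [a] :: (b :: g) :: gs
    | gs => [a] :: gs

def is_isogram_alt (card : String) : Bool :=
  (isogramRuns card.toList).all (fun g => g.length == 1)

-- ===== PRECONDITION & SPEC =====
def Spec_is_isogram (card : String) (out : Bool) : Prop := out = is_isogram_alt card
instance (card : String) (out : Bool) : Decidable (Spec_is_isogram card out) := by unfold Spec_is_isogram; infer_instance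

-- ===== CLAIM (what is proved, stated in full; the proofs are below) =====
def Claim_equal_is_isogram : Prop := ∀ (card : String), Dom_is_isogram card → Spec_is_isogram card (is_isogram card)

-- ===== LEMMAS AND PROOFS =====

-- common characterisation: no two adjacent characters are equal
def noAdj : List Char → Bool
  | a :: b :: t => if a == b then false else noAdj (b :: t)
  | _ => true

-- one-step unfolding of isogramRuns on a cons, given the shape of the tail's runs
theorem isogramRuns_cons_eq (a : Char) (t : List Char) (b : Char) (g : List Char)
    (gs : List (List Char)) (h : isogramRuns t = (b :: g) :: gs) :
    isogramRuns (a :: t) =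
      if a == b then (a :: b :: g) :: gs else [a] :: (b :: g) :: gs := by
  have hstep : isogramRuns (a :: t) =
      match isogramRuns t with
      | (b :: g) :: gs => if a == b then (a :: b :: g) :: gs else [a] :: (b :: g) :: gs
      | gs => [a] :: gs := rfl
  rw [hstep, h]

theorem isogramRuns_head (b : Char) (t : List Char) :
    ∃ g gs, isogramRuns (b :: t) = (b :: g) :: gs := by
  induction t generalizing b with
  | nil => exact ⟨[], [], rfl⟩
  | cons c t ih =>
    obtain ⟨g, gs, h⟩ := ih c
    rw [isogramRuns_cons_eq b (c :: t) c g gs h]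
    by_cases hbc : b = c
    · exact ⟨c :: g, gs, by simp [hbc]⟩
    · exact ⟨[], (c :: g) :: gs, by simp [hbc]⟩

theorem runs_all_eq_noAdj (l : List Char) :
    ((isogramRuns l).all (fun g => g.length == 1)) = noAdj l := by
  induction l with
  | nil => rfl
  | cons a t ih =>
    cases t with
    | nil => rfl
    | cons b t' =>
      obtain ⟨g, gs, h⟩ := isogramRuns_head b t'
      rw [h] at ih
      rw [isogramRuns_cons_eq a (b :: t') b g gs h]
      by_cases hab : a = b
      · simp [hab, noAdj]
      · simp [hab, noAdj] at ih ⊢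
        exact ih

theorem loopA_eq_noAdj_drop (s : List Char) (i : Nat) :
    isogramLoopA s i = noAdj (s.drop i) := by
  by_cases h : i < s.length - 1
  · have hi : i < s.length := by omega
    have hi1 : i + 1 < s.length := by omega
    have hd : s.drop i = s[i] :: s.drop (i + 1) := List.drop_eq_getElem_cons hi
    have hd1 : s.drop (i + 1) = s[i + 1] :: s.drop (i + 2) := List.drop_eq_getElem_cons hi1
    rw [isogramLoopA, dif_pos h, hd, hd1, noAdj]
    by_cases he : s[i] = s[i + 1]
    · simp [he]
    · have hrec := loopA_eq_noAdj_drop s (i + 1)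
      rw [hd1] at hrec
      simp [he, hrec]
  · rw [isogramLoopA, dif_neg h]
    rcases Nat.lt_or_ge i s.length with hi | hi
    · have hd : s.drop i = [s[i]] := by
        have := List.drop_eq_getElem_cons hi
        rw [this, List.drop_eq_nil_of_le (by omega)]
      rw [hd]; rfl
    · rw [List.drop_eq_nil_of_le hi]; rfl
termination_by s.length - 1 - i

-- ===== VERDICT (by name: the statement is the Claim_ definition above) =====
theorem is_isogram_spec : Claim_equal_is_isogram := by
  intro card _
  unfold Spec_is_isogram is_isogram is_isogram_alt
  rw [runs_all_eq_noAdj]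
  by_cases h : PySem.Str.len card < 1
  · have hnil : card.toList = [] := by
      simp [PySem.Str.len] at h
      simp [h]
    rw [if_pos h, hnil]; rfl
  · rw [if_neg h, loopA_eq_noAdj_drop card.toList 0, List.drop_zero]
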